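-- pv_equiv track=rewrite | github.com/kyleguggy13/FFE-pyRevit | FFE-pyRevit.extension/FFE-pyRevit.tab/BetaTools.panel/col2.stack/PhaseFilterCompare.pushbutton/script.py | compare_phase_filters
-- ===== SOURCE A (Python) =====
-- def compare_phase_filters(host_map, link_map):
--     """Return (missing_in_link, extra_in_link, diffs).
--        diffs: [(filter_name, prop, host_val, link_val)]
--     """
--     host_names = set(host_map.keys())
--     link_names = set(link_map.keys())
--
--     missing_in_link = sorted(list(host_names - link_names))
--     extra_in_link   = sorted(list(link_names - host_names))
--
--     diffs = []
--     common = host_names & link_names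
--     props = ("ShowNew", "ShowExisting", "ShowDemolished", "ShowTemporary")
--     for fname in sorted(common):
--         for p in props:
--             hv = host_map[fname].get(p, None)
--             lv = link_map[fname].get(p, None)
--             if (hv is not None) and (lv is not None) and (hv != lv):
--                 diffs.append((fname, p, hv, lv))
--     return missing_in_link, extra_in_link, diffs
-- ===== SOURCE B (Python) =====
-- def compare_phase_filters(host_map, link_map):
--     """Two-pointer merge-join over the two independently sorted key lists:
--     instead of set algebra, advance an index into each sorted list, routing
--     the smaller name to missing/extra and equal names to the prop check."""
--     props = ("ShowNew", "ShowExisting", "ShowDemolished", "ShowTemporary")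
--     hs, ls = sorted(host_map), sorted(link_map)
--     i = j = 0
--     missing_in_link, extra_in_link, diffs = [], [], []
--     while i < len(hs) and j < len(ls):
--         a, b = hs[i], ls[j]
--         if a < b:
--             missing_in_link.append(a)
--             i += 1
--         elif b < a:
--             extra_in_link.append(b)
--             j += 1
--         else:
--             h, l = host_map[a], link_map[a]
--             for p in props:
--                 hv, lv = h.get(p), l.get(p)
--                 if hv is not None and lv is not None and hv != lv:
--                     diffs.append((a, p, hv, lv))
--             i += 1
--             j += 1
--     missing_in_link.extend(hs[i:])
--     extra_in_link.extend(ls[j:])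
--     return missing_in_link, extra_in_link, diffs
-- ===== Notes on version B (the rewrite author's own statement) =====
-- stated objective: alternative
-- what changed: Replaces A's set difference/intersection operations (each followed by its own sort) with a two-pointer merge-join of the two independently sorted key lists, which emits missing/extra/diff entries in order as the pointers advance.
import Mathlib
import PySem

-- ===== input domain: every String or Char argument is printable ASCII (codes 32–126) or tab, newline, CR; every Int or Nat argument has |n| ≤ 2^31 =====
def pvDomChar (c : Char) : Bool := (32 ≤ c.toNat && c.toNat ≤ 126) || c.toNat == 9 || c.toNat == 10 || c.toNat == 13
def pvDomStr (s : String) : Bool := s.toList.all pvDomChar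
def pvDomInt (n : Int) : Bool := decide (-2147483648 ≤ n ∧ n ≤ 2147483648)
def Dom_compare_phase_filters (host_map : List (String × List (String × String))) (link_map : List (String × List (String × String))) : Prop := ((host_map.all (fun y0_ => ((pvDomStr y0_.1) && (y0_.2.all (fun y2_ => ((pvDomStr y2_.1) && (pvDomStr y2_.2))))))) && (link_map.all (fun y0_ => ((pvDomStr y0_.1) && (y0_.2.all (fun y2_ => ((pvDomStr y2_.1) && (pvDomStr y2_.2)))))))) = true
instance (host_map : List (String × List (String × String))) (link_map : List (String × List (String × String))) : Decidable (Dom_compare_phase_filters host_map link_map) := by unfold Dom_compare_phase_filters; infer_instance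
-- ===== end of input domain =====

-- B replaces A's set difference/intersection computations (each with its own sort) by a
-- two-pointer merge-join of the two independently sorted key lists (objective: alternative
-- algorithm, same cost).

-- ===== PORT A =====
-- the fixed property tuple ("ShowNew", "ShowExisting", "ShowDemolished", "ShowTemporary")
def pvPropsA : List String := ["ShowNew", "ShowExisting", "ShowDemolished", "ShowTemporary"]

-- host_map[fname].get(p, None): fname is drawn from common, so host_map[fname] cannot raise;
-- ported with Option.bind (none would mean KeyError, unreachable here).
def compare_phase_filters (host_map : List (String × List (String × String))) (link_map : List (String × List (String × String))) : List String × List String × (List (String × String × String × String)) :=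
  let host_names := PySem.Set.ofList (host_map.map Prod.fst)
  let link_names := PySem.Set.ofList (link_map.map Prod.fst)
  let missing_in_link := PySem.List.sorted (PySem.Set.diff host_names link_names) (fun x => x) false
  let extra_in_link := PySem.List.sorted (PySem.Set.diff link_names host_names) (fun x => x) false
  let common := PySem.Set.inter host_names link_names
  let diffs := (PySem.List.sorted common (fun x => x) false).foldl (fun acc fname =>
      pvPropsA.foldl (fun acc p =>
        match ((PySem.Dict.mk host_map).get? fname).bind (fun d => (PySem.Dict.mk d).get? p),
              ((PySem.Dict.mk link_map).get? fname).bind (fun d => (PySem.Dict.mk d).get? p) with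
        | some hv, some lv => if hv ≠ lv then acc ++ [(fname, p, hv, lv)] else acc
        | _, _ => acc) acc) []
  (missing_in_link, extra_in_link, diffs)

-- ===== PORT B =====
-- B's own copy of the fixed property tuple
def pvPropsB : List String := ["ShowNew", "ShowExisting", "ShowDemolished", "ShowTemporary"]

-- the while loop: two pointers into the sorted key lists, modelled as recursion on the two
-- suffixes hs = hs0[i:], ls = ls0[j:]; the final extends are the fall-through cases.
-- host_map[a] / link_map[a] in the equal branch cannot raise (a is a key of both),
-- ported with .getD [] (the default is unreachable).
def pvMergeB (host_map link_map : List (String × List (String × String))) :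
    List String → List String →
    (List String × List String × List (String × String × String × String)) →
    (List String × List String × List (String × String × String × String))
  | a :: hs, b :: ls, acc =>
    if a < b then
      pvMergeB host_map link_map hs (b :: ls) (acc.1 ++ [a], acc.2.1, acc.2.2)
    else if b < a then
      pvMergeB host_map link_map (a :: hs) ls (acc.1, acc.2.1 ++ [b], acc.2.2)
    else
      -- h, l = host_map[a], link_map[a] (inlined bindings)
      pvMergeB host_map link_map hs ls (acc.1, acc.2.1,
        pvPropsB.foldl (fun d p =>
          match (PySem.Dict.mk (((PySem.Dict.mk host_map).get? a).getD [])).get? p,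
                (PySem.Dict.mk (((PySem.Dict.mk link_map).get? a).getD [])).get? p with
          | some hv, some lv => if hv ≠ lv then d ++ [(a, p, hv, lv)] else d
          | none, _ => d
          | some _, none => d) acc.2.2)
  | hs, ls, acc => (acc.1 ++ hs, acc.2.1 ++ ls, acc.2.2)
termination_by hs ls => hs.length + ls.length

def compare_phase_filters_alt (host_map : List (String × List (String × String))) (link_map : List (String × List (String × String))) : List String × List String × (List (String × String × String × String)) :=
  let hs := PySem.List.sorted (PySem.Set.ofList (host_map.map Prod.fst)) (fun x => x) false
  let ls := PySem.List.sorted (PySem.Set.ofList (link_map.map Prod.fst)) (fun x => x) false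
  pvMergeB host_map link_map hs ls ([], [], [])

-- ===== PRECONDITION & SPEC =====
def Spec_compare_phase_filters (host_map : List (String × List (String × String))) (link_map : List (String × List (String × String))) (out : List String × List String × (List (String × String × String × String))) : Prop := out = compare_phase_filters_alt host_map link_map
instance (host_map : List (String × List (String × String))) (link_map : List (String × List (String × String))) (out : List String × List String × (List (String × String × String × String))) : Decidable (Spec_compare_phase_filters host_map link_map out) := by unfold Spec_compare_phase_filters; infer_instance

-- ===== CLAIM (what is proved, stated in full; the proofs are below) =====
def Claim_equal_compare_phase_filters : Prop := ∀ (host_map : List (String × List (String × String))) (link_map : List (String × List (String × String))), Dom_compare_phase_filters host_map link_map → Spec_compare_phase_filters host_map link_map (compare_phase_filters host_map link_map)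

-- ===== LEMMAS AND PROOFS =====

-- unfolded form of port A (definitional)
theorem pvA_unfold (host_map link_map : List (String × List (String × String))) :
    compare_phase_filters host_map link_map
    = (PySem.List.sorted (PySem.Set.diff (PySem.Set.ofList (host_map.map Prod.fst)) (PySem.Set.ofList (link_map.map Prod.fst))) (fun x => x) false,
       PySem.List.sorted (PySem.Set.diff (PySem.Set.ofList (link_map.map Prod.fst)) (PySem.Set.ofList (host_map.map Prod.fst))) (fun x => x) false,
       (PySem.List.sorted (PySem.Set.inter (PySem.Set.ofList (host_map.map Prod.fst)) (PySem.Set.ofList (link_map.map Prod.fst))) (fun x => x) false).foldl (fun acc fname =>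
         pvPropsA.foldl (fun acc p =>
           match ((PySem.Dict.mk host_map).get? fname).bind (fun d => (PySem.Dict.mk d).get? p),
                 ((PySem.Dict.mk link_map).get? fname).bind (fun d => (PySem.Dict.mk d).get? p) with
           | some hv, some lv => if hv ≠ lv then acc ++ [(fname, p, hv, lv)] else acc
           | _, _ => acc) acc) []) := rfl

-- one row of diffs for a filter name (the inner props loop, flatMap form)
def pvRowA (host_map link_map : List (String × List (String × String))) (fname : String) : List (String × String × String × String) :=
  pvPropsA.flatMap (fun p =>
    match ((PySem.Dict.mk host_map).get? fname).bind (fun d => (PySem.Dict.mk d).get? p),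
          ((PySem.Dict.mk link_map).get? fname).bind (fun d => (PySem.Dict.mk d).get? p) with
    | some hv, some lv => if hv ≠ lv then [(fname, p, hv, lv)] else []
    | _, _ => [])

def pvRowB (host_map link_map : List (String × List (String × String))) (fname : String) : List (String × String × String × String) :=
  pvPropsB.flatMap (fun p =>
    match (PySem.Dict.mk (((PySem.Dict.mk host_map).get? fname).getD [])).get? p,
          (PySem.Dict.mk (((PySem.Dict.mk link_map).get? fname).getD [])).get? p with
    | some hv, some lv => if hv ≠ lv then [(fname, p, hv, lv)] else []
    | none, _ => []
    | some _, none => [])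

-- a foldl whose step appends is a flatMap
theorem pv_foldl_app {α β : Type} (f : List β → α → List β) (g : α → List β)
    (h : ∀ a x, f a x = a ++ g x) :
    ∀ (l : List α) (acc : List β), l.foldl f acc = acc ++ l.flatMap g := by
  intro l
  induction l with
  | nil => intro acc; simp
  | cons x t ih => intro acc; rw [List.foldl_cons, h, ih, List.flatMap_cons, List.append_assoc]

-- one step of B's inner props loop appends its (possibly empty) contribution
theorem pv_inner_stepB (fname p : String) (o1 o2 : Option String)
    (acc : List (String × String × String × String)) :
    (match o1, o2 with
     | some hv, some lv => if hv ≠ lv then acc ++ [(fname, p, hv, lv)] else acc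
     | none, _ => acc
     | some _, none => acc)
    = acc ++ (match o1, o2 with
     | some hv, some lv => if hv ≠ lv then [(fname, p, hv, lv)] else []
     | none, _ => []
     | some _, none => []) := by
  cases o1 with
  | none => simp
  | some hv =>
    cases o2 with
    | none => simp
    | some lv => by_cases h : hv = lv <;> simp [h]

-- one step of A's inner props loop (A's wildcard case split)
theorem pv_inner_stepA (fname p : String) (o1 o2 : Option String)
    (acc : List (String × String × String × String)) :
    (match o1, o2 with
     | some hv, some lv => if hv ≠ lv then acc ++ [(fname, p, hv, lv)] else acc
     | _, _ => acc)
    = acc ++ (match o1, o2 with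
     | some hv, some lv => if hv ≠ lv then [(fname, p, hv, lv)] else []
     | _, _ => []) := by
  cases o1 with
  | none => simp
  | some hv =>
    cases o2 with
    | none => simp
    | some lv => by_cases h : hv = lv <;> simp [h]

-- A's diffs loop is a flatMap of rows
theorem pvA_diffs (host_map link_map : List (String × List (String × String)))
    (l : List String) (acc : List (String × String × String × String)) :
    l.foldl (fun acc fname =>
      pvPropsA.foldl (fun acc p =>
        match ((PySem.Dict.mk host_map).get? fname).bind (fun d => (PySem.Dict.mk d).get? p),
              ((PySem.Dict.mk link_map).get? fname).bind (fun d => (PySem.Dict.mk d).get? p) with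
        | some hv, some lv => if hv ≠ lv then acc ++ [(fname, p, hv, lv)] else acc
        | _, _ => acc) acc) acc
    = acc ++ l.flatMap (pvRowA host_map link_map) :=
  pv_foldl_app _ (pvRowA host_map link_map)
    (fun a fname => pv_foldl_app
      (fun acc p =>
        match ((PySem.Dict.mk host_map).get? fname).bind (fun d => (PySem.Dict.mk d).get? p),
              ((PySem.Dict.mk link_map).get? fname).bind (fun d => (PySem.Dict.mk d).get? p) with
        | some hv, some lv => if hv ≠ lv then acc ++ [(fname, p, hv, lv)] else acc
        | _, _ => acc)
      (fun p =>
        match ((PySem.Dict.mk host_map).get? fname).bind (fun d => (PySem.Dict.mk d).get? p),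
              ((PySem.Dict.mk link_map).get? fname).bind (fun d => (PySem.Dict.mk d).get? p) with
        | some hv, some lv => if hv ≠ lv then [(fname, p, hv, lv)] else []
        | _, _ => [])
      (fun a2 p => pv_inner_stepA fname p _ _ a2) pvPropsA a) l acc

-- characterisation of B's merge loop on strictly increasing key lists
theorem pvB_merge_eq (host_map link_map : List (String × List (String × String))) :
    ∀ (hs ls : List String), hs.Pairwise (· < ·) → ls.Pairwise (· < ·) →
    ∀ (m e : List String) (d : List (String × String × String × String)),
    pvMergeB host_map link_map hs ls (m, e, d)
    = (m ++ hs.filter (fun x => !ls.contains x),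
       e ++ ls.filter (fun x => !hs.contains x),
       d ++ (hs.filter (fun x => ls.contains x)).flatMap (pvRowB host_map link_map)) := by
  intro hs
  induction hs with
  | nil =>
    intro ls _ _ m e d
    cases ls <;> simp [pvMergeB]
  | cons a hs ih =>
    intro ls
    induction ls with
    | nil => intro _ _ m e d; simp [pvMergeB]
    | cons b ls ihl =>
      intro hhs hls m e d
      have hhs' := (List.pairwise_cons.mp hhs).2
      have hls' := (List.pairwise_cons.mp hls).2
      have hbls := (List.pairwise_cons.mp hls).1
      have hahs := (List.pairwise_cons.mp hhs).1
      by_cases hab : a < b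
      · -- a goes to missing; a is below everything in b :: ls
        have hnab : ∀ x ∈ b :: ls, a ≠ x := by
          intro x hx
          rcases List.mem_cons.mp hx with rfl | hx
          · exact ne_of_lt hab
          · exact ne_of_lt (lt_trans hab (hbls x hx))
        rw [pvMergeB, if_pos hab, ih (b :: ls) hhs' hls]
        have hcont : (b :: ls).contains a = false := by
          simp only [List.contains_eq_mem, decide_eq_false_iff_not]
          intro hx; exact hnab a hx rfl
        have hcontx : ∀ x ∈ b :: ls, ((a :: hs).contains x) = hs.contains x := by
          intro x hx
          simp only [List.contains_cons]
          have : (x == a) = false := by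
            simp only [beq_eq_false_iff_ne]; exact fun h => hnab x hx h.symm
          simp [this]
        rw [List.filter_congr (l := b :: ls)
              (p := fun x => !(a :: hs).contains x) (q := fun x => !hs.contains x)
              (by intro x hx; show (!(a :: hs).contains x) = (!hs.contains x); rw [hcontx x hx])]
        have hne : ¬ a = b := hnab b List.mem_cons_self
        have hnin : a ∉ ls := fun hx => hnab a (List.mem_cons_of_mem b hx) rfl
        simp [List.filter_cons, hne, hnin, List.append_assoc]
      · by_cases hba : b < a
        · -- b goes to extra; b is below everything in a :: hs
          have hnab : ∀ x ∈ a :: hs, b ≠ x := by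
            intro x hx
            rcases List.mem_cons.mp hx with rfl | hx
            · exact ne_of_lt hba
            · exact ne_of_lt (lt_trans hba (hahs x hx))
          rw [pvMergeB, if_neg hab, if_pos hba, ihl hhs hls']
          have hcont : (a :: hs).contains b = false := by
            simp only [List.contains_eq_mem, decide_eq_false_iff_not]
            intro hx; exact hnab b hx rfl
          have hcontx : ∀ x ∈ a :: hs, ((b :: ls).contains x) = ls.contains x := by
            intro x hx
            simp only [List.contains_cons]
            have : (x == b) = false := by
              simp only [beq_eq_false_iff_ne]; exact fun h => hnab x hx h.symm
            simp [this]
          rw [List.filter_congr (l := a :: hs)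
                (p := fun x => !(b :: ls).contains x) (q := fun x => !ls.contains x)
                (by intro x hx; show (!(b :: ls).contains x) = (!ls.contains x); rw [hcontx x hx]),
              List.filter_congr (l := a :: hs)
                (p := fun x => (b :: ls).contains x) (q := fun x => ls.contains x)
                (by intro x hx; show ((b :: ls).contains x) = (ls.contains x); rw [hcontx x hx])]
          have hne : ¬ b = a := hnab a List.mem_cons_self
          have hnin : b ∉ hs := fun hx => hnab b (List.mem_cons_of_mem a hx) rfl
          simp [List.filter_cons, hne, hnin, List.append_assoc]
        · -- a = b: common name
          have hba' : a = b := le_antisymm (not_lt.mp hba) (not_lt.mp hab)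
          subst hba'
          rw [pvMergeB, if_neg hab, if_neg hab]
          rw [pv_foldl_app
            (fun d p =>
              match (PySem.Dict.mk (((PySem.Dict.mk host_map).get? a).getD [])).get? p,
                    (PySem.Dict.mk (((PySem.Dict.mk link_map).get? a).getD [])).get? p with
              | some hv, some lv => if hv ≠ lv then d ++ [(a, p, hv, lv)] else d
              | none, _ => d
              | some _, none => d)
            (fun p =>
              match (PySem.Dict.mk (((PySem.Dict.mk host_map).get? a).getD [])).get? p,
                    (PySem.Dict.mk (((PySem.Dict.mk link_map).get? a).getD [])).get? p with
              | some hv, some lv => if hv ≠ lv then [(a, p, hv, lv)] else []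
              | none, _ => []
              | some _, none => [])
            (fun a2 p => pv_inner_stepB a p _ _ a2) pvPropsB d]
          rw [ih ls hhs' hls']
          have hnh : ∀ x ∈ hs, x ≠ a := fun x hx => (ne_of_lt (hahs x hx)).symm
          have hnl : ∀ x ∈ ls, x ≠ a := fun x hx => (ne_of_lt (hbls x hx)).symm
          have hca : ∀ x ∈ hs, ((a :: ls).contains x) = ls.contains x := by
            intro x hx
            simp only [List.contains_cons]
            have h1 : (x == a) = false := by simp only [beq_eq_false_iff_ne]; exact hnh x hx
            simp [h1]
          have hcb : ∀ x ∈ ls, ((a :: hs).contains x) = hs.contains x := by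
            intro x hx
            simp only [List.contains_cons]
            have h1 : (x == a) = false := by simp only [beq_eq_false_iff_ne]; exact hnl x hx
            simp [h1]
          have e1 : List.filter (fun x => !(a :: ls).contains x) (a :: hs)
              = List.filter (fun x => !ls.contains x) hs := by
            rw [List.filter_cons_of_neg (by simp)]
            exact List.filter_congr (fun x hx => by
              show (!(a :: ls).contains x) = (!ls.contains x); rw [hca x hx])
          have e2 : List.filter (fun x => !(a :: hs).contains x) (a :: ls)
              = List.filter (fun x => !hs.contains x) ls := by
            rw [List.filter_cons_of_neg (by simp)]
            exact List.filter_congr (fun x hx => by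
              show (!(a :: hs).contains x) = (!hs.contains x); rw [hcb x hx])
          have e3 : List.filter (fun x => (a :: ls).contains x) (a :: hs)
              = a :: List.filter (fun x => ls.contains x) hs := by
            rw [List.filter_cons_of_pos (by simp)]
            congr 1
            exact List.filter_congr (fun x hx => by
              show ((a :: ls).contains x) = (ls.contains x); rw [hca x hx])
          rw [e1, e2, e3]
          simp [pvRowB, List.append_assoc]

-- sorted of any dedup'd subset S of a nodup universe U equals filtering the sorted U
theorem pv_sorted_filter (U S : List String) (p : String → Bool)
    (hU : U.Nodup) (hS : S.Nodup)
    (hmem : ∀ x, x ∈ S ↔ x ∈ U ∧ p x = true) :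
    PySem.List.sorted S (fun x => x) false
      = (PySem.List.sorted U (fun x => x) false).filter p := by
  have hperm : (PySem.List.sorted U (fun x => x) false).Perm U := PySem.List.sorted_perm _ _ _
  apply PySem.List.sorted_eq_of_perm_of_pairwise_lt
  · refine (hperm.filter p).trans ?_
    refine ((List.perm_ext_iff_of_nodup (hU.filter p) hS).mpr ?_)
    intro a
    simp [List.mem_filter, hmem]
  · have hle : (PySem.List.sorted U (fun x => x) false).Pairwise (fun a b => a ≤ b) :=
      PySem.List.sorted_pairwise _ _
    have hnd : (PySem.List.sorted U (fun x => x) false).Nodup := hperm.nodup_iff.mpr hU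
    have hlt : (PySem.List.sorted U (fun x => x) false).Pairwise (fun a b : String => a < b) :=
      (hle.and hnd).imp (fun h => lt_of_le_of_ne h.1 h.2)
    exact hlt.filter p

-- membership in the sorted key list
theorem pv_mem_sortedKeys (l : List String) (x : String) :
    ((PySem.List.sorted (PySem.Set.ofList l) (fun y => y) false).contains x) = true ↔ x ∈ l := by
  have hperm := PySem.List.sorted_perm (PySem.Set.ofList l) (fun y : String => y) false
  rw [List.contains_eq_mem, decide_eq_true_iff, hperm.mem_iff, PySem.Set.mem_ofList]

-- B's three-case match computes the same as A's two-case match (per property)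
theorem pv_match_shapes (fname p : String) (o1 o2 : Option String) :
    (match o1, o2 with
     | some hv, some lv => if hv ≠ lv then [(fname, p, hv, lv)] else []
     | none, _ => ([] : List (String × String × String × String))
     | some _, none => [])
    = (match o1, o2 with
     | some hv, some lv => if hv ≠ lv then [(fname, p, hv, lv)] else []
     | _, _ => []) := by
  cases o1 <;> cases o2 <;> rfl

-- on a common name the two row computations agree
theorem pv_row_eq (host_map link_map : List (String × List (String × String))) (fname : String)
    (hH : fname ∈ host_map.map Prod.fst) (hL : fname ∈ link_map.map Prod.fst) :
    pvRowA host_map link_map fname = pvRowB host_map link_map fname := by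
  have h1 : ((PySem.Dict.mk host_map).get? fname).isSome := by
    rw [← PySem.Dict.contains_eq_isSome_get?, PySem.Dict.contains_iff_mem_keys]
    simpa using hH
  have h2 : ((PySem.Dict.mk link_map).get? fname).isSome := by
    rw [← PySem.Dict.contains_eq_isSome_get?, PySem.Dict.contains_iff_mem_keys]
    simpa using hL
  obtain ⟨hd, e1⟩ := Option.isSome_iff_exists.mp h1
  obtain ⟨ld, e2⟩ := Option.isSome_iff_exists.mp h2
  simp only [pvRowA, pvRowB, pvPropsA, pvPropsB, e1, e2, Option.bind,
    Option.getD_some, List.flatMap_cons, List.flatMap_nil, pv_match_shapes]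

-- flatMap congruence on the elements of the list
theorem pv_flatMap_congr {α β : Type} (l : List α) (f g : α → List β)
    (h : ∀ x ∈ l, f x = g x) : l.flatMap f = l.flatMap g := by
  induction l with
  | nil => simp
  | cons a t ih =>
    simp only [List.flatMap_cons]
    rw [h a List.mem_cons_self, ih (fun x hx => h x (List.mem_cons_of_mem a hx))]

-- ===== VERDICT (by name: the statement is the Claim_ definition above) =====
theorem compare_phase_filters_spec : Claim_equal_compare_phase_filters := by
  intro host_map link_map _
  unfold Spec_compare_phase_filters
  rw [pvA_unfold]
  unfold compare_phase_filters_alt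
  rw [pvB_merge_eq host_map link_map _ _
        (PySem.List.sorted_ofList_pairwise_lt (host_map.map Prod.fst)) (PySem.List.sorted_ofList_pairwise_lt (link_map.map Prod.fst)),
      pvA_diffs]
  simp only [List.nil_append]
  refine congrArg₂ _ ?_ (congrArg₂ _ ?_ ?_)
  · exact pv_sorted_filter _ _ _ (PySem.Set.nodup_ofList _)
      (PySem.Set.nodup_diff _ _ (PySem.Set.nodup_ofList _))
      (by intro x
          rw [PySem.Set.mem_diff]
          constructor
          · rintro ⟨h1, h2⟩
            refine ⟨h1, ?_⟩
            simp only [Bool.not_eq_true']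
            rw [← Bool.not_eq_true, pv_mem_sortedKeys]
            rwa [PySem.Set.mem_ofList] at h2
          · rintro ⟨h1, h2⟩
            refine ⟨h1, ?_⟩
            rw [PySem.Set.mem_ofList]
            intro hm
            have hc := (pv_mem_sortedKeys _ _).mpr hm
            simp only [Bool.not_eq_true'] at h2
            rw [h2] at hc
            cases hc)
  · exact pv_sorted_filter _ _ _ (PySem.Set.nodup_ofList _)
      (PySem.Set.nodup_diff _ _ (PySem.Set.nodup_ofList _))
      (by intro x
          rw [PySem.Set.mem_diff]
          constructor
          · rintro ⟨h1, h2⟩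
            refine ⟨h1, ?_⟩
            simp only [Bool.not_eq_true']
            rw [← Bool.not_eq_true, pv_mem_sortedKeys]
            rwa [PySem.Set.mem_ofList] at h2
          · rintro ⟨h1, h2⟩
            refine ⟨h1, ?_⟩
            rw [PySem.Set.mem_ofList]
            intro hm
            have hc := (pv_mem_sortedKeys _ _).mpr hm
            simp only [Bool.not_eq_true'] at h2
            rw [h2] at hc
            cases hc)
  · rw [pv_sorted_filter (PySem.Set.ofList (host_map.map Prod.fst))
          (PySem.Set.inter (PySem.Set.ofList (host_map.map Prod.fst)) (PySem.Set.ofList (link_map.map Prod.fst)))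
          (fun x => (PySem.List.sorted (PySem.Set.ofList (link_map.map Prod.fst)) (fun y => y) false).contains x)
          (PySem.Set.nodup_ofList _)
          (PySem.Set.nodup_inter _ _ (PySem.Set.nodup_ofList _))
          (by intro x
              rw [PySem.Set.mem_inter, pv_mem_sortedKeys, PySem.Set.mem_ofList]
              constructor
              · rintro ⟨h1, h2⟩; exact ⟨h1, by rwa [PySem.Set.mem_ofList] at h2⟩
              · rintro ⟨h1, h2⟩; exact ⟨h1, by rwa [PySem.Set.mem_ofList]⟩)]
    exact pv_flatMap_congr _ _ _
      (fun x hx => pv_row_eq host_map link_map x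
        (by have := (List.mem_filter.mp hx).1
            rwa [(PySem.List.sorted_perm _ _ _).mem_iff, PySem.Set.mem_ofList] at this)
        (by have := (List.mem_filter.mp hx).2
            rwa [pv_mem_sortedKeys] at this))
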